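-- pv_equiv track=rewrite | github.com/cptlemons/Advent-of-Code | 2017/Day11/d11.py | part1
-- ===== SOURCE A (Python) =====
-- from copy import deepcopy
--
-- def part1(directions):
--     directions = deepcopy(directions)
--
--     new_directions = remove_opposites(directions)
--     count = {}
--
--     for direct in new_directions:
--         if direct in count:
--             count[direct] += 1
--         else:
--             count[direct] = 1
--
--     return sum(count.values()) - min(count.values()), new_directions
--
-- def remove_opposites(directions):
--     while 'ne' in directions and 'sw' in directions:
--         directions.remove('ne')
--         directions.remove('sw')
--     while 'nw' in directions and 'se' in directions:
--         directions.remove('nw')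
--         directions.remove('se')
--     while 'n' in directions and 's' in directions:
--         directions.remove('n')
--         directions.remove('s')
--     return directions
-- ===== SOURCE B (Python) =====
-- def part1(directions):
--     # Count every direction once, cancel opposite pairs arithmetically, then one
--     # linear pass that skips the first m occurrences of each cancelled direction.
--     cnt = {}
--     for d in directions:
--         cnt[d] = cnt.get(d, 0) + 1
--     skips = {}
--     for a, b in (('ne', 'sw'), ('nw', 'se'), ('n', 's')):
--         m = min(cnt.get(a, 0), cnt.get(b, 0))
--         skips[a] = m
--         skips[b] = m
--     rem_counts = []
--     for d, c in cnt.items():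
--         r = c - skips.get(d, 0)
--         if r > 0:
--             rem_counts.append(r)
--     skip = dict(skips)
--     remaining = []
--     for d in directions:
--         if skip.get(d, 0) > 0:
--             skip[d] -= 1
--         else:
--             remaining.append(d)
--     return len(remaining) - min(rem_counts), remaining
-- ===== Notes on version B (the rewrite author's own statement) =====
-- stated objective: faster
-- what changed: A cancels opposite directions by repeatedly scanning and list.remove-ing pairs (quadratic) and then builds a count dict of the result; B counts every direction once, computes the number m of cancelled pairs per axis arithmetically, and produces the surviving list in one linear pass that skips the first m occurrences of each cancelled direction, deriving the distance from the counts.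
-- outside the precondition, e.g. on part1(['ne', 'sw']): A raises ValueError, B raises ValueError; on part1([]): A raises ValueError, B raises ValueError
import Mathlib
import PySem

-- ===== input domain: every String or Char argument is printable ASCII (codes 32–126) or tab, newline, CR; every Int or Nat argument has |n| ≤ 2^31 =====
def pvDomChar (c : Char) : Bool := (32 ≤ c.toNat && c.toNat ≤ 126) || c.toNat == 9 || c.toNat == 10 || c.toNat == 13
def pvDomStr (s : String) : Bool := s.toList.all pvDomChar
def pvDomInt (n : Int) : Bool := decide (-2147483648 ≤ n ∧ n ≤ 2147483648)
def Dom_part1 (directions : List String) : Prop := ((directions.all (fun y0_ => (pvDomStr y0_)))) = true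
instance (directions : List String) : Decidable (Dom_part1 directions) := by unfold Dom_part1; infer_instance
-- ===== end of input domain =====

-- B replaces A's quadratic repeated list.remove cancellation by counting each
-- direction once and skipping the first m occurrences in a single linear pass.
-- A does not mutate its argument (it deepcopies), so only return values are at stake.

-- ===== PORT A =====
-- 'while a in l and b in l: l.remove(a); l.remove(b)': list.remove removes the
-- first occurrence of a present element, which is List.erase
-- (exact by PySem.List.remove?_eq_some_erase; both removes are guarded by 'in').
def removeLoop (a b : String) (l : List String) : List String :=
  if h : a ∈ l ∧ b ∈ l then
    -- h is used by the termination proof below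
    removeLoop a b ((l.erase a).erase b) else l
termination_by l.length
decreasing_by
  calc ((l.erase a).erase b).length ≤ (l.erase a).length := List.length_erase_le
    _ < l.length := by
        rw [List.length_erase_of_mem h.1]; have := List.length_pos_of_mem h.1; omega

def part1 (directions : List String) : Int × List String :=
  let new_directions := removeLoop "n" "s" (removeLoop "nw" "se" (removeLoop "ne" "sw" directions))
  let count := new_directions.foldl
    (fun d x => if d.contains x then d.insert x (d.getD x 0 + 1) else d.insert x (1 : Int))
    (PySem.Dict.empty : PySem.Dict String Int)
  -- min(count.values()) raises ValueError on an empty dict; those inputs are outside Pre_part1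
  (count.values.sum - (PySem.List.min? count.values (fun v => v)).getD 0, new_directions)

-- ===== PORT B =====
def part1_alt (directions : List String) : Int × List String :=
  let cnt := directions.foldl (fun d x => d.insert x (d.getD x 0 + 1))
    (PySem.Dict.empty : PySem.Dict String Int)
  let skips := ([("ne", "sw"), ("nw", "se"), ("n", "s")] : List (String × String)).foldl
    (fun sk p =>
      let m := min (cnt.getD p.1 0) (cnt.getD p.2 0)
      (sk.insert p.1 m).insert p.2 m)
    (PySem.Dict.empty : PySem.Dict String Int)
  let rem_counts := cnt.items.foldl
    (fun acc dc =>
      let r := dc.2 - skips.getD dc.1 0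
      if r > 0 then acc ++ [r] else acc) ([] : List Int)
  -- 'skip = dict(skips)' copies an immutable value here, so skips is reused directly
  let res := directions.foldl
    (fun (st : PySem.Dict String Int × List String) d =>
      if st.1.getD d 0 > 0 then (st.1.modify d 0 (· - 1), st.2) else (st.1, st.2 ++ [d]))
    (skips, ([] : List String))
  -- min(rem_counts) raises ValueError on an empty list; those inputs are outside Pre_part1
  ((res.2.length : Int) - (PySem.List.min? rem_counts (fun v => v)).getD 0, res.2)

-- ===== PRECONDITION & SPEC =====
-- Pre_ excludes exactly the inputs on which every direction cancels away (all elements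
-- among the six compass strings with opposite counts equal): there A raises ValueError
-- (min of an empty dict's values) and B raises ValueError too (min of an empty list).
def Pre_part1 (directions : List String) : Prop :=
  ¬ ((∀ d ∈ directions, d = "ne" ∨ d = "sw" ∨ d = "nw" ∨ d = "se" ∨ d = "n" ∨ d = "s") ∧
     directions.count "ne" = directions.count "sw" ∧
     directions.count "nw" = directions.count "se" ∧
     directions.count "n" = directions.count "s")
instance (directions : List String) : Decidable (Pre_part1 directions) := by
  unfold Pre_part1; infer_instance

def pvWitness_part1 : List String := ["ne", "ne", "sw", "nw", "n", "s"]

def Spec_part1 (directions : List String) (out : Int × List String) : Prop := out = part1_alt directions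
instance (directions : List String) (out : Int × List String) : Decidable (Spec_part1 directions out) := by unfold Spec_part1; infer_instance

-- ===== CLAIM (what is proved, stated in full; the proofs are below) =====
def Claim_equal_part1 : Prop := ∀ (directions : List String), Dom_part1 directions → Pre_part1 directions → Spec_part1 directions (part1 directions)

-- ===== LEMMAS AND PROOFS =====

-- skip state: how many leading occurrences of each string remain to be dropped
def decS (s : String → Nat) (x : String) : String → Nat := fun y => if y = x then s y - 1 else s y

def skipF (s : String → Nat) : List String → List String
  | [] => []
  | x :: xs => if s x ≠ 0 then skipF (decS s x) xs else x :: skipF s xs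

def pairS (a b : String) (m : Nat) : String → Nat := fun y => if y = a ∨ y = b then m else 0

-- the combined skip state of the three cancellation loops
def SA (l : List String) : String → Nat := fun y =>
  pairS "n" "s" (min (l.count "n") (l.count "s")) y
  + (pairS "nw" "se" (min (l.count "nw") (l.count "se")) y
     + pairS "ne" "sw" (min (l.count "ne") (l.count "sw")) y)

theorem skipF_of_zero (s : String → Nat) (hs : ∀ x, s x = 0) (l : List String) :
    skipF s l = l := by
  induction l with
  | nil => rfl
  | cons x xs ih => simp [skipF, hs x, ih]

theorem count_skipF (s : String → Nat) (l : List String) (v : String) :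
    (skipF s l).count v = l.count v - min (s v) (l.count v) := by
  induction l generalizing s with
  | nil => simp [skipF]
  | cons x xs ih =>
    simp only [skipF]
    by_cases hx : s x = 0
    · rw [if_neg (by simpa using hx)]
      by_cases hv : x = v
      · subst hv; simp [List.count_cons_self, ih, hx]
      · have hv' : ¬ v = x := fun h => hv (Eq.symm h)
        simp [hv, ih s]
    · rw [if_pos (by simpa using hx)]
      by_cases hv : x = v
      · subst hv
        rw [ih, List.count_cons_self]
        have hd : decS s x x = s x - 1 := by simp [decS]
        rw [hd]
        omega
      · rw [ih]
        have hv' : ¬ v = x := fun h => hv (Eq.symm h)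
        have hd : decS s x v = s v := by simp only [decS]; rw [if_neg hv']
        simp [hv, hd]

theorem skipF_erase (s : String → Nat) (a : String) (l : List String)
    (hs : s a ≠ 0) (ha : a ∈ l) :
    skipF s l = skipF (decS s a) (l.erase a) := by
  induction l generalizing s with
  | nil => cases ha
  | cons x xs ih =>
    by_cases hx : x = a
    · subst hx
      rw [List.erase_cons_head]
      simp only [skipF]
      rw [if_pos (by simpa using hs)]
    · have ha' : a ∈ xs := by
        cases List.mem_cons.mp ha with
        | inl h => exact absurd h.symm hx
        | inr h => exact h
      rw [List.erase_cons_tail (by simpa using hx)]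
      simp only [skipF]
      by_cases hsx : s x = 0
      · have h2 : decS s a x = 0 := by simp [decS, hsx]
        rw [if_neg (by simpa using hsx), if_neg (by simpa using h2), ih s hs ha']
      · have h2 : decS s a x ≠ 0 := by simpa [decS, hx] using hsx
        rw [if_pos (by simpa using hsx), if_pos (by simpa using h2)]
        have hcomm : decS (decS s x) a = decS (decS s a) x := by
          funext y; simp only [decS]; split_ifs <;> rfl
        have hax : ¬ a = x := fun h => hx (Eq.symm h)
        have hsa : decS s x a ≠ 0 := by simp only [decS]; rw [if_neg hax]; exact hs
        rw [ih (decS s x) hsa ha', hcomm]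

theorem skipF_skipF (s t : String → Nat) (l : List String)
    (hdisj : ∀ x, s x = 0 ∨ t x = 0) :
    skipF s (skipF t l) = skipF (fun y => s y + t y) l := by
  induction l generalizing s t with
  | nil => simp [skipF]
  | cons x xs ih =>
    simp only [skipF]
    by_cases htx : t x = 0
    · rw [if_neg (by simpa using htx)]
      by_cases hsx : s x = 0
      · simp only [skipF]
        rw [if_neg (by simpa using hsx), if_neg (by simp [hsx, htx]), ih s t hdisj]
      · simp only [skipF]
        rw [if_pos (by simpa using hsx), if_pos (by simp [hsx])]
        have heq : (fun y => decS s x y + t y) = decS (fun y => s y + t y) x := by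
          funext y; simp only [decS]; split_ifs with h
          · subst h; omega
          · rfl
        rw [ih (decS s x) t (fun y => by by_cases h : y = x <;> simp [decS, h, hdisj y, htx]), heq]
    · rw [if_pos (by simpa using htx), if_pos (by simp; omega)]
      have hsx : s x = 0 := (hdisj x).resolve_right htx
      have heq : (fun y => s y + decS t x y) = decS (fun y => s y + t y) x := by
        funext y; simp only [decS]; split_ifs with h
        · subst h; omega
        · rfl
      rw [ih s (decS t x) (fun y => by by_cases h : y = x <;> simp [decS, h, hdisj y, hsx]), heq]

theorem pairS_eq_zero (a b : String) (m : Nat) (y : String) (h1 : y ≠ a) (h2 : y ≠ b) :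
    pairS a b m y = 0 := by simp [pairS, h1, h2]

theorem removeLoop_eq (a b : String) (hab : a ≠ b) (l : List String) :
    removeLoop a b l = skipF (pairS a b (min (l.count a) (l.count b))) l := by
  induction l using removeLoop.induct a b with
  | case1 l h ih =>
    rw [removeLoop, dif_pos h, ih]
    obtain ⟨ha, hb⟩ := h
    have hca : 0 < l.count a := List.count_pos_iff.mpr ha
    have hcb : 0 < l.count b := List.count_pos_iff.mpr hb
    have hba : ¬ b = a := fun h => hab (Eq.symm h)
    have hm : 0 < min (l.count a) (l.count b) := lt_min hca hcb
    have hcount : min (((l.erase a).erase b).count a) (((l.erase a).erase b).count b)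
        = min (l.count a) (l.count b) - 1 := by
      rw [List.count_erase_of_ne hab, List.count_erase_self,
          List.count_erase_self, List.count_erase_of_ne hba]
      omega
    have hpa : pairS a b (min (l.count a) (l.count b)) a ≠ 0 := by
      simp [pairS]; omega
    have hpbv : decS (pairS a b (min (l.count a) (l.count b))) a b
        = min (l.count a) (l.count b) := by
      simp [decS, pairS, hba]
    have hpb : decS (pairS a b (min (l.count a) (l.count b))) a b ≠ 0 := by
      rw [hpbv]; omega
    have key : decS (decS (pairS a b (min (l.count a) (l.count b))) a) b
        = pairS a b (min (l.count a) (l.count b) - 1) := by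
      funext y
      by_cases hya : y = a
      · subst hya; simp [decS, pairS, hab]
      · by_cases hyb : y = b
        · subst hyb; simp [decS, pairS, hba]
        · simp [decS, pairS, hya, hyb]
    rw [skipF_erase _ a l hpa ha,
        skipF_erase _ b (l.erase a) hpb ((List.mem_erase_of_ne hba).mpr hb),
        key, hcount]
  | case2 l h =>
    rw [removeLoop, dif_neg h]
    have hm : min (l.count a) (l.count b) = 0 := by
      rcases not_and_or.mp h with h' | h'
      · simp [List.count_eq_zero_of_not_mem h']
      · simp [List.count_eq_zero_of_not_mem h']
    rw [hm]
    exact (skipF_of_zero _ (fun x => by simp [pairS]) l).symm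

theorem nd_eq (l : List String) :
    removeLoop "n" "s" (removeLoop "nw" "se" (removeLoop "ne" "sw" l)) = skipF (SA l) l := by
  have c0 : ∀ (v a b : String) (m : Nat), v ≠ a → v ≠ b →
      (skipF (pairS a b m) l).count v = l.count v := by
    intro v a b m h1 h2
    rw [count_skipF, pairS_eq_zero a b m v h1 h2]
    omega
  rw [removeLoop_eq "ne" "sw" (by decide) l]
  rw [removeLoop_eq "nw" "se" (by decide) _]
  rw [c0 "nw" "ne" "sw" _ (by decide) (by decide), c0 "se" "ne" "sw" _ (by decide) (by decide)]
  have hd1 : ∀ x, pairS "nw" "se" (min (l.count "nw") (l.count "se")) x = 0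
      ∨ pairS "ne" "sw" (min (l.count "ne") (l.count "sw")) x = 0 := by
    intro x
    by_cases h1 : x = "nw"
    · subst h1; right; exact pairS_eq_zero _ _ _ _ (by decide) (by decide)
    · by_cases h2 : x = "se"
      · subst h2; right; exact pairS_eq_zero _ _ _ _ (by decide) (by decide)
      · left; exact pairS_eq_zero _ _ _ _ h1 h2
  rw [skipF_skipF _ _ l hd1]
  rw [removeLoop_eq "n" "s" (by decide) _]
  have c1 : ∀ (v : String), v ≠ "nw" → v ≠ "se" → v ≠ "ne" → v ≠ "sw" →
      (skipF (fun y => pairS "nw" "se" (min (l.count "nw") (l.count "se")) y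
        + pairS "ne" "sw" (min (l.count "ne") (l.count "sw")) y) l).count v = l.count v := by
    intro v h1 h2 h3 h4
    rw [count_skipF, pairS_eq_zero _ _ _ _ h1 h2, pairS_eq_zero _ _ _ _ h3 h4]
    omega
  rw [c1 "n" (by decide) (by decide) (by decide) (by decide),
      c1 "s" (by decide) (by decide) (by decide) (by decide)]
  have hd2 : ∀ x, pairS "n" "s" (min (l.count "n") (l.count "s")) x = 0
      ∨ (pairS "nw" "se" (min (l.count "nw") (l.count "se")) x
         + pairS "ne" "sw" (min (l.count "ne") (l.count "sw")) x) = 0 := by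
    intro x
    by_cases h1 : x = "n"
    · subst h1; right
      rw [pairS_eq_zero _ _ _ _ (by decide) (by decide), pairS_eq_zero _ _ _ _ (by decide) (by decide)]
    · by_cases h2 : x = "s"
      · subst h2; right
        rw [pairS_eq_zero _ _ _ _ (by decide) (by decide), pairS_eq_zero _ _ _ _ (by decide) (by decide)]
      · left; exact pairS_eq_zero _ _ _ _ h1 h2
  rw [skipF_skipF _ _ l hd2]
  rfl

theorem SA_le (l : List String) (y : String) : SA l y ≤ l.count y := by
  by_cases h1 : y = "n"
  · subst h1; simp [SA, pairS]
  · by_cases h2 : y = "s"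
    · subst h2; simp [SA, pairS]
    · by_cases h3 : y = "nw"
      · subst h3; simp [SA, pairS]
      · by_cases h4 : y = "se"
        · subst h4; simp [SA, pairS]
        · by_cases h5 : y = "ne"
          · subst h5; simp [SA, pairS]
          · by_cases h6 : y = "sw"
            · subst h6; simp [SA, pairS]
            · rw [SA, pairS_eq_zero _ _ _ _ h1 h2, pairS_eq_zero _ _ _ _ h3 h4,
                  pairS_eq_zero _ _ _ _ h5 h6]
              omega

theorem count_nd (l : List String) (v : String) :
    (skipF (SA l) l).count v = l.count v - SA l v := by
  rw [count_skipF]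
  have := SA_le l v
  omega

-- A's counting loop builds Counter(new_directions)
theorem countDict_eq (m : List String) :
    m.foldl (fun d x => if d.contains x then d.insert x (d.getD x 0 + 1) else d.insert x (1 : Int))
      (PySem.Dict.empty : PySem.Dict String Int) = PySem.Dict.counter m := by
  rw [← PySem.Dict.foldl_insert_getD_add_one_eq_counter]
  apply PySem.List.foldl_congr_mem
  intro d x _
  by_cases hc : d.contains x = true
  · rw [if_pos hc]
  · rw [if_neg (by simpa using hc)]
    have h0 : d.getD x 0 = 0 := PySem.Dict.getD_of_not_contains d 0 (by simpa using hc)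
    rw [h0]
    norm_num

theorem values_counter (m : List String) :
    (PySem.Dict.counter (κ := String) m).values
      = (PySem.Set.ofList m).map (fun k => (m.count k : Int)) := by
  simp only [PySem.Dict.values, PySem.Dict.items_counter, List.map_map]
  rfl

theorem sum_counts (m : List String) :
    ((PySem.Set.ofList m).map (fun k => (m.count k : Int))).sum = (m.length : Int) := by
  have hperm : (PySem.Set.ofList m).Perm m.dedup := by
    rw [List.perm_ext_iff_of_nodup (PySem.Set.nodup_ofList m) m.nodup_dedup]
    intro a
    rw [PySem.Set.mem_ofList, List.mem_dedup]
  calc ((PySem.Set.ofList m).map (fun k => (m.count k : Int))).sum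
      = (m.dedup.map (fun k => (m.count k : Int))).sum := (hperm.map _).sum_eq
    _ = ((m.dedup.map (fun k => m.count k)).map (fun n : Nat => (n : Int))).sum := by
        rw [List.map_map]; rfl
    _ = (((m.dedup.map (fun k => m.count k)).sum : Nat) : Int) := by
        rw [Nat.cast_list_sum]
    _ = (m.length : Int) := by rw [List.sum_map_count_dedup_eq_length]

-- Python's min over equal multisets gives the same value (key = identity)
def minStep (o : Option Int) (y : Int) : Option Int :=
  some (match o with | none => y | some z => min z y)

theorem foldl_minStep_some (t : List Int) (x : Int) :
    t.foldl minStep (some x) = some (t.foldl min x) := by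
  induction t generalizing x with
  | nil => rfl
  | cons y t ih => simp only [List.foldl_cons, minStep, ih]

theorem pymin_eq_foldl (m : List Int) :
    PySem.List.min? m (fun v => v) = m.foldl minStep none := by
  cases m with
  | nil => rfl
  | cons x t =>
    rw [PySem.List.min?_id_cons]
    simp only [List.foldl_cons, minStep, foldl_minStep_some]

theorem pymin_perm (m m' : List Int) (h : m.Perm m') :
    PySem.List.min? m (fun v => v) = PySem.List.min? m' (fun v => v) := by
  rw [pymin_eq_foldl, pymin_eq_foldl]
  apply h.foldl_eq'
  intro x _ y _ z
  cases z <;> simp [minStep] <;> omega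

-- the simultaneous skip pass of B, with dict state, is skipF
theorem foldB_eq (l : List String) (d : PySem.Dict String Int) (acc : List String)
    (hnn : ∀ k, 0 ≤ d.getD k 0) :
    (l.foldl
      (fun (st : PySem.Dict String Int × List String) x =>
        if st.1.getD x 0 > 0 then (st.1.modify x 0 (· - 1), st.2) else (st.1, st.2 ++ [x]))
      (d, acc)).2 = acc ++ skipF (fun y => (d.getD y 0).toNat) l := by
  induction l generalizing d acc with
  | nil => simp [skipF]
  | cons x xs ih =>
    simp only [List.foldl_cons, skipF]
    by_cases hp : d.getD x 0 > 0
    · rw [if_pos hp, if_pos (by simpa using (by omega : (d.getD x 0).toNat ≠ 0))]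
      rw [ih _ acc (fun k => by
        rw [PySem.Dict.getD_modify]
        split_ifs with h
        · omega
        · exact hnn k)]
      have hfun : (fun y => (((d.modify x 0 (· - 1)).getD y 0)).toNat)
          = decS (fun y => (d.getD y 0).toNat) x := by
        funext y
        rw [PySem.Dict.getD_modify]
        simp only [decS]
        split_ifs with h
        · subst h; have := hnn y; omega
        · rfl
      rw [hfun]
    · rw [if_neg hp, if_neg (by simpa using (by have := hnn x; omega : (d.getD x 0).toNat = 0))]
      rw [ih d (acc ++ [x]) hnn, List.append_assoc]
      rfl

-- a generic 'append to the output when the test passes' loop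
theorem foldl_append_if_map {α β : Type} (p : α → Prop) [DecidablePred p] (f : α → β)
    (l : List α) (acc : List β) :
    l.foldl (fun acc x => if p x then acc ++ [f x] else acc) acc
      = acc ++ (l.filter (fun x => decide (p x))).map f := by
  induction l generalizing acc with
  | nil => simp
  | cons x xs ih =>
    simp only [List.foldl_cons, List.filter_cons]
    by_cases hp : p x
    · rw [if_pos hp, ih, if_pos (by simpa using hp)]
      simp
    · rw [if_neg hp, ih, if_neg (by simpa using hp)]

def skipsD (l : List String) : PySem.Dict String Int :=
  ((((((PySem.Dict.empty :
      PySem.Dict String Int).insert "ne" (min (l.count "ne" : Int) (l.count "sw" : Int))).insert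
      "sw" (min (l.count "ne" : Int) (l.count "sw" : Int))).insert
      "nw" (min (l.count "nw" : Int) (l.count "se" : Int))).insert
      "se" (min (l.count "nw" : Int) (l.count "se" : Int))).insert
      "n" (min (l.count "n" : Int) (l.count "s" : Int))).insert
      "s" (min (l.count "n" : Int) (l.count "s" : Int))

theorem getD_skipsD (l : List String) (y : String) :
    (skipsD l).getD y 0 = ((SA l y : Nat) : Int) := by
  unfold skipsD
  rw [PySem.Dict.getD_insert, PySem.Dict.getD_insert, PySem.Dict.getD_insert,
      PySem.Dict.getD_insert, PySem.Dict.getD_insert, PySem.Dict.getD_insert]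
  by_cases h1 : y = "s"
  · subst h1; simp [SA, pairS, Nat.cast_min]
  · by_cases h2 : y = "n"
    · subst h2; simp [SA, pairS, Nat.cast_min]
    · by_cases h3 : y = "se"
      · subst h3; simp [SA, pairS, Nat.cast_min]
      · by_cases h4 : y = "nw"
        · subst h4; simp [SA, pairS, Nat.cast_min]
        · by_cases h5 : y = "sw"
          · subst h5; simp [SA, pairS, Nat.cast_min]
          · by_cases h6 : y = "ne"
            · subst h6; simp [SA, pairS, Nat.cast_min]
            · rw [if_neg h1, if_neg h2, if_neg h3, if_neg h4, if_neg h5, if_neg h6,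
                  PySem.Dict.getD_empty, SA,
                  pairS_eq_zero _ _ _ _ h2 h1, pairS_eq_zero _ _ _ _ h4 h3,
                  pairS_eq_zero _ _ _ _ h6 h5]
              rfl

theorem partA_eval (l : List String) :
    part1 l =
      (((skipF (SA l) l).length : Int)
        - (PySem.List.min?
            ((PySem.Set.ofList (skipF (SA l) l)).map (fun k => ((skipF (SA l) l).count k : Int)))
            (fun v => v)).getD 0,
       skipF (SA l) l) := by
  simp only [part1]
  rw [nd_eq, countDict_eq, values_counter, sum_counts]

theorem partB_eval (l : List String) :
    part1_alt l =
      (((skipF (SA l) l).length : Int)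
        - (PySem.List.min?
            (((PySem.Set.ofList l).filter
                (fun k => decide ((0:Int) < (l.count k : Int) - ((SA l k : Nat) : Int)))).map
              (fun k => (l.count k : Int) - ((SA l k : Nat) : Int)))
            (fun v => v)).getD 0,
       skipF (SA l) l) := by
  simp only [part1_alt, List.foldl_cons, List.foldl_nil]
  rw [PySem.Dict.foldl_insert_getD_add_one_eq_counter]
  simp only [PySem.Dict.getD_counter]
  have hD : ((((((PySem.Dict.empty :
      PySem.Dict String Int).insert "ne" (min (l.count "ne" : Int) (l.count "sw" : Int))).insert
      "sw" (min (l.count "ne" : Int) (l.count "sw" : Int))).insert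
      "nw" (min (l.count "nw" : Int) (l.count "se" : Int))).insert
      "se" (min (l.count "nw" : Int) (l.count "se" : Int))).insert
      "n" (min (l.count "n" : Int) (l.count "s" : Int))).insert
      "s" (min (l.count "n" : Int) (l.count "s" : Int)) = skipsD l := rfl
  rw [hD]
  rw [foldB_eq l (skipsD l) [] (fun k => by rw [getD_skipsD]; exact Int.natCast_nonneg _)]
  rw [List.nil_append]
  simp only [getD_skipsD, Int.toNat_natCast]
  rw [foldl_append_if_map (p := fun dc : String × Int => dc.2 - ((SA l dc.1 : Nat) : Int) > 0)
      (f := fun dc : String × Int => dc.2 - ((SA l dc.1 : Nat) : Int))]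
  rw [List.nil_append, PySem.Dict.items_counter, List.filter_map, List.map_map]
  simp only [Function.comp_def, gt_iff_lt]

-- ===== VERDICT (by name: the statement is the Claim_ definition above) =====
theorem part1_spec : Claim_equal_part1 := by
  unfold Claim_equal_part1
  intro l _ _
  unfold Spec_part1
  rw [partA_eval, partB_eval]
  have hg : ∀ k, ((skipF (SA l) l).count k : Int) = (l.count k : Int) - ((SA l k : Nat) : Int) := by
    intro k
    rw [count_nd, Nat.cast_sub (SA_le l k)]
  have hperm : (PySem.Set.ofList (skipF (SA l) l)).Perm
      ((PySem.Set.ofList l).filter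
        (fun k => decide ((0:Int) < (l.count k : Int) - ((SA l k : Nat) : Int)))) := by
    rw [List.perm_ext_iff_of_nodup (PySem.Set.nodup_ofList _)
        ((PySem.Set.nodup_ofList l).filter _)]
    intro k
    rw [PySem.Set.mem_ofList, List.mem_filter, PySem.Set.mem_ofList,
        ← List.count_pos_iff, ← List.count_pos_iff, count_nd]
    have hle := SA_le l k
    constructor
    · intro h
      refine ⟨by omega, by simp; omega⟩
    · rintro ⟨h1, h2⟩
      simp at h2
      omega
  have hmin : PySem.List.min?
        ((PySem.Set.ofList (skipF (SA l) l)).map (fun k => ((skipF (SA l) l).count k : Int)))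
        (fun v => v)
      = PySem.List.min?
        (((PySem.Set.ofList l).filter
            (fun k => decide ((0:Int) < (l.count k : Int) - ((SA l k : Nat) : Int)))).map
          (fun k => (l.count k : Int) - ((SA l k : Nat) : Int)))
        (fun v => v) := by
    have h1 : ((PySem.Set.ofList (skipF (SA l) l)).map (fun k => ((skipF (SA l) l).count k : Int)))
        = ((PySem.Set.ofList (skipF (SA l) l)).map
            (fun k => (l.count k : Int) - ((SA l k : Nat) : Int))) := by
      apply List.map_congr_left
      intro k _
      exact hg k
    rw [h1]
    exact pymin_perm _ _ (hperm.map _)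
  rw [hmin]
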